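-- pv_equiv track=rewrite | github.com/Atharv-Attri/HacktoberFest-Projects | Projects/Python/organizer.py | extDetection
-- ===== SOURCE A (Python) =====
-- def extDetection(ext):
--     valid = True
--     correct = 0
--     for l in range(len(ext)):
--         if (ext[l]>="a" and ext[l]<="z") or (ext[l]>="1" and ext[l]<="9"):
--             correct +=1
--     if correct == len(ext):
--         valid = True
--     else:
--         valid = False
--
--     return valid
-- ===== SOURCE B (Python) =====
-- def extDetection(ext):
--     allowed = set("abcdefghijklmnopqrstuvwxyz123456789")
--     return set(ext).issubset(allowed)
-- ===== Notes on version B (the rewrite author's own statement) =====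
-- stated objective: idiomatic
-- what changed: B builds the allowed-character set once and tests set(ext).issubset(allowed), replacing A's index loop that counts matching positions and compares the count to the length.
import Mathlib
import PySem

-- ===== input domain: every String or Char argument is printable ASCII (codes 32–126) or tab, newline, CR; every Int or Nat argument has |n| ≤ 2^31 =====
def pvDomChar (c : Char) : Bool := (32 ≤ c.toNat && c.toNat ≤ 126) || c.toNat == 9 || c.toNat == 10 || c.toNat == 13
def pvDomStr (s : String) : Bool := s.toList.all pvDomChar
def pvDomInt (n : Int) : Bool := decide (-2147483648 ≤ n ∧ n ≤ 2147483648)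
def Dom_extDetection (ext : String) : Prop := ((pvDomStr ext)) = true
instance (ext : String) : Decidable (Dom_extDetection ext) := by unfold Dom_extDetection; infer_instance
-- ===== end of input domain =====

-- B replaces A's index loop (count matching positions, compare count to length) with a
-- one-shot allowed-character set and a subset test; objective: idiomatic.

-- ===== PORT A =====
def extDetection (ext : String) : Bool :=
  let correct : Int :=
    (PySem.List.pyRange 0 (ext.toList.length : Int) 1).foldl
      (fun correct l =>
        match PySem.Str.pyGet? ext l with
        | some c =>
          if ('a' ≤ c ∧ c ≤ 'z') ∨ ('1' ≤ c ∧ c ≤ '9') then correct + 1 else correct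
        | none => correct)
      0
  if correct = (ext.toList.length : Int) then true else false

-- ===== PORT B =====
def extDetection_alt (ext : String) : Bool :=
  let allowed : PySem.Set Char :=
    PySem.Set.ofList "abcdefghijklmnopqrstuvwxyz123456789".toList
  PySem.Set.issubset (PySem.Set.ofList ext.toList) allowed

-- ===== PRECONDITION & SPEC =====
def Spec_extDetection (ext : String) (out : Bool) : Prop := out = extDetection_alt ext
instance (ext : String) (out : Bool) : Decidable (Spec_extDetection ext out) := by unfold Spec_extDetection; infer_instance

-- ===== CLAIM (what is proved, stated in full; the proofs are below) =====
def Claim_equal_extDetection : Prop := ∀ (ext : String), Dom_extDetection ext → Spec_extDetection ext (extDetection ext)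

-- ===== LEMMAS AND PROOFS =====

-- the per-character predicate of A's branch (abbrev: keeps decidability inferable)
abbrev pvAllowedP (c : Char) : Prop := ('a' ≤ c ∧ c ≤ 'z') ∨ ('1' ≤ c ∧ c ≤ '9')

theorem pv_char_le_iff (c d : Char) : c ≤ d ↔ c.toNat ≤ d.toNat := by
  rw [Char.le_def, UInt32.le_iff_toNat_le]; rfl

theorem pv_char_eq_iff (c d : Char) : c = d ↔ c.toNat = d.toNat := by
  constructor
  · intro h; rw [h]
  · intro h; exact Char.ext (UInt32.toNat_inj.mp h)

-- membership in B's allowed set ↔ A's range condition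
theorem pv_mem_allowed (c : Char) :
    c ∈ "abcdefghijklmnopqrstuvwxyz123456789".toList ↔ pvAllowedP c := by
  unfold pvAllowedP
  simp only [show "abcdefghijklmnopqrstuvwxyz123456789".toList =
      ['a','b','c','d','e','f','g','h','i','j','k','l','m','n','o','p','q','r','s','t',
       'u','v','w','x','y','z','1','2','3','4','5','6','7','8','9'] from rfl,
    List.mem_cons, List.not_mem_nil, or_false, pv_char_eq_iff, pv_char_le_iff]
  simp
  omega

-- A's loop counts exactly the characters satisfying pvAllowedP
theorem pv_loop_eq (l : List Char) :
    (List.range l.length).foldl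
      (fun (acc : Int) (k : Nat) => match PySem.List.pyGet? l (k : Int) with
        | some c => if pvAllowedP c then acc + 1 else acc
        | none => acc) (0 : Int)
    = (l.countP (fun c => decide (pvAllowedP c)) : Int) := by
  induction l using List.reverseRecOn with
  | nil => simp
  | append_singleton l c ih =>
    rw [List.length_append, List.length_singleton, List.range_succ, List.foldl_append]
    have h1 : (List.range l.length).foldl
        (fun (acc : Int) (k : Nat) => match PySem.List.pyGet? (l ++ [c]) (k : Int) with
          | some c => if pvAllowedP c then acc + 1 else acc
          | none => acc) (0 : Int)
        = (List.range l.length).foldl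
        (fun (acc : Int) (k : Nat) => match PySem.List.pyGet? l (k : Int) with
          | some c => if pvAllowedP c then acc + 1 else acc
          | none => acc) (0 : Int) := by
      apply List.foldl_ext
      intro acc k hk
      rw [List.mem_range] at hk
      rw [PySem.List.pyGet?_natCast, PySem.List.pyGet?_natCast, List.getElem?_append_left hk]
    rw [h1, ih]
    rw [List.foldl_cons, List.foldl_nil, PySem.List.pyGet?_natCast,
      List.getElem?_concat_length, List.countP_append]
    split
    · rename_i h
      cases h
      rw [List.countP_singleton]
      by_cases hp : pvAllowedP c <;> simp [hp]
    · rename_i h; exact absurd h (by simp)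

-- ===== VERDICT (by name: the statement is the Claim_ definition above) =====
theorem extDetection_spec : Claim_equal_extDetection := by
  intro ext _
  unfold Spec_extDetection extDetection extDetection_alt
  rw [PySem.List.pyRange_zero_natCast, List.foldl_map]
  have h2 : (fun (acc : Int) (k : Nat) => match PySem.Str.pyGet? ext (k : Int) with
      | some c => if ('a' ≤ c ∧ c ≤ 'z') ∨ ('1' ≤ c ∧ c ≤ '9') then acc + 1 else acc
      | none => acc)
      = (fun (acc : Int) (k : Nat) => match PySem.List.pyGet? ext.toList (k : Int) with
      | some c => if pvAllowedP c then acc + 1 else acc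
      | none => acc) := by
    funext acc k
    rw [PySem.Str.pyGet?_natCast, PySem.List.pyGet?_natCast]
  rw [h2, pv_loop_eq]
  have hA : ((ext.toList.countP (fun c => decide (pvAllowedP c)) : Int) = (ext.toList.length : Int))
      ↔ ∀ x ∈ ext.toList, pvAllowedP x := by
    rw [Nat.cast_inj, List.countP_eq_length]
    simp
  have hB : PySem.Set.issubset (PySem.Set.ofList ext.toList)
      (PySem.Set.ofList "abcdefghijklmnopqrstuvwxyz123456789".toList) = true
      ↔ ∀ x ∈ ext.toList, pvAllowedP x := by
    rw [PySem.Set.issubset_iff]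
    simp only [PySem.Set.mem_ofList, pv_mem_allowed]
  dsimp only
  split_ifs with h
  · exact (hB.mpr (hA.mp h)).symm
  · symm
    rw [Bool.eq_false_iff]
    intro hib
    exact h (hA.mpr (hB.mp hib))
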